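-- pv_equiv track=rewrite | github.com/alex-s-hong/code_prep | c3/repeat_permutation_sum.py | combpermuSum
-- ===== SOURCE A (Python) =====
-- def combpermuSum(digits:list, target:int):
--     result = []
--
--     def backtrack(remain, comb):
--         if remain == 0:
--             result.append(comb[:])
--
--         elif remain < 0:
--             return
--
--         else:
--             for i in range(len(digits)):
--
--                 comb.append(digits[i])
--
--                 backtrack(remain-digits[i], comb)
--
--                 comb.pop()
--
--     backtrack(target, [])
--
--     return result
-- ===== SOURCE B (Python) =====
-- def combpermuSum(digits: list, target: int):
--     # Iterative DFS with an explicit stack of (remaining, partial-combination)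
--     # states, replacing A's recursive backtracking with a shared mutable list.
--     result = []
--     stack = [(target, [])]
--     while stack:
--         remain, comb = stack.pop()
--         if remain == 0:
--             result.append(comb)
--         elif remain > 0:
--             for i in range(len(digits) - 1, -1, -1):
--                 stack.append((remain - digits[i], comb + [digits[i]]))
--     return result
-- ===== Notes on version B (the rewrite author's own statement) =====
-- stated objective: alternative
-- what changed: Replaced A's recursive backtracking helper (mutating a shared comb list and an outer result list) with an iterative depth-first search over an explicit stack of (remain, partial-combination) states, pushing children in reverse index order to reproduce A's exact output order.
-- outside the precondition, e.g. on combpermuSum([0], 1): A raises RecursionError, B does not finish within the time limit; on combpermuSum([-1, 2], 1): A raises RecursionError, B does not finish within the time limit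
import Mathlib
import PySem

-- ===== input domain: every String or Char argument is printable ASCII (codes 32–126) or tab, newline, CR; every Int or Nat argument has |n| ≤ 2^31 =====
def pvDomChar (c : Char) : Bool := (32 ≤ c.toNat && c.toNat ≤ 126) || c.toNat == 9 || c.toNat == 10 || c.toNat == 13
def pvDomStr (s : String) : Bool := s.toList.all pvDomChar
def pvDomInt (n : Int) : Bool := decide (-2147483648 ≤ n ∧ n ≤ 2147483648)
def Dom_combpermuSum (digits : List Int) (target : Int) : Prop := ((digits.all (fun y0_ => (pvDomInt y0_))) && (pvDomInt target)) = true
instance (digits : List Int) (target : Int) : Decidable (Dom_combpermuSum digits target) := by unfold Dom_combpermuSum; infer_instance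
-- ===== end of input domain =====

-- B replaces A's recursive backtracking (shared result list, mutable comb) by an
-- iterative DFS over an explicit stack of (remain, comb) states; same output order.

-- ===== PORT A =====
-- A's recursive helper `backtrack`; the fuel only makes the recursion total in Lean
-- (inside Pre_ the fuel given below is never exhausted, so it is A's computation step for step).
def btA (digits : List Int) : Nat → Int → List Int → List (List Int)
  | 0, _, _ => []
  | f + 1, remain, comb =>
    if remain = 0 then [comb]
    else if remain < 0 then []
    else digits.foldl (fun acc d => acc ++ btA digits f (remain - d) (comb ++ [d])) []

def combpermuSum (digits : List Int) (target : Int) : List (List Int) :=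
  btA digits (target.toNat + 1) target []

-- ===== PORT B =====
-- B's `while stack:` loop; the stack top is the list head (children pushed in reverse
-- index order in Source B are popped in forward order, hence `digits.map … ++ st`).
-- The fuel only makes the loop total in Lean; inside Pre_ the fuel below never runs out.
def loopB (digits : List Int) : Nat → List (Int × List Int) → List (List Int) → List (List Int)
  | 0, _, res => res
  | _ + 1, [], res => res
  | f + 1, (r, c) :: st, res =>
    if r = 0 then loopB digits f st (res ++ [c])
    else if 0 < r then loopB digits f (digits.map (fun d => (r - d, c ++ [d])) ++ st) res
    else loopB digits f st res

def combpermuSum_alt (digits : List Int) (target : Int) : List (List Int) :=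
  loopB digits ((digits.length + 1) ^ (target.toNat + 1)) [(target, [])] []

-- ===== PRECONDITION & SPEC =====
-- Pre_ excludes exactly the inputs where target > 0 and some digit ≤ 0: there A recurses
-- forever and dies with RecursionError (a raise), so no value is claimed.
def Pre_combpermuSum (digits : List Int) (target : Int) : Prop :=
  0 < target → ∀ d ∈ digits, 0 < d
instance (digits : List Int) (target : Int) : Decidable (Pre_combpermuSum digits target) := by
  unfold Pre_combpermuSum; infer_instance

def pvWitness_combpermuSum : List Int × Int := ([1, 2], 4)

def Spec_combpermuSum (digits : List Int) (target : Int) (out : List (List Int)) : Prop := out = combpermuSum_alt digits target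
instance (digits : List Int) (target : Int) (out : List (List Int)) : Decidable (Spec_combpermuSum digits target out) := by unfold Spec_combpermuSum; infer_instance

-- ===== CLAIM (what is proved, stated in full; the proofs are below) =====
def Claim_equal_combpermuSum : Prop := ∀ (digits : List Int) (target : Int), Dom_combpermuSum digits target → Pre_combpermuSum digits target → Spec_combpermuSum digits target (combpermuSum digits target)

-- ===== LEMMAS AND PROOFS =====

-- A's backtrack does not depend on the fuel once the fuel exceeds the remaining sum
-- (digits positive ⇒ each recursive call drops `remain` by at least one).
theorem btA_fuel_irrel (digits : List Int) (hpos : ∀ d ∈ digits, 0 < d) :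
    ∀ f g r c, r.toNat + 1 ≤ f → r.toNat + 1 ≤ g →
      btA digits f r c = btA digits g r c := by
  intro f
  induction f using Nat.strong_induction_on with
  | _ f ih =>
    intro g r c hf hg
    match f, g with
    | f' + 1, g' + 1 =>
      simp only [btA]
      split
      · rfl
      · split
        · rfl
        · rename_i hne hlt
          refine PySem.List.foldl_congr_mem _ _ _ _ ?_
          intro acc d hd
          have hd1 : 0 < d := hpos d hd
          have hr : 0 < r := by omega
          have hsub : (r - d).toNat + 1 ≤ r.toNat := by omega
          congr 1
          exact ih f' (Nat.lt_succ_self _) g' (r - d) (c ++ [d]) (by omega) (by omega)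

-- the value of one subtree, with its canonical fuel
def node (digits : List Int) (p : Int × List Int) : List (List Int) :=
  btA digits (p.1.toNat + 1) p.1 p.2

theorem node_pos (digits : List Int) (hpos : ∀ d ∈ digits, 0 < d) (r : Int) (c : List Int)
    (hr : 0 < r) :
    node digits (r, c) = (digits.map (fun d => node digits (r - d, c ++ [d]))).flatten := by
  simp only [node]
  have : btA digits (r.toNat + 1) r c
      = digits.foldl (fun acc d => acc ++ btA digits r.toNat (r - d) (c ++ [d])) [] := by
    simp only [btA]
    split
    · omega
    · split
      · omega
      · rfl
  rw [this, PySem.List.foldl_congr_mem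
      (g := fun acc d => acc ++ node digits (r - d, c ++ [d]))]
  · rw [PySem.List.foldl_append_eq_flatMap]
    simp [List.flatMap_def, node]
  · intro acc d hd
    have hd1 : 0 < d := hpos d hd
    congr 1
    exact btA_fuel_irrel digits hpos r.toNat ((r - d).toNat + 1) (r - d) (c ++ [d])
      (by omega) (le_refl _)

-- fuel bound for the whole stack
def cost (digits : List Int) (st : List (Int × List Int)) : Nat :=
  (st.map (fun p => (digits.length + 1) ^ (p.1.toNat + 1))).sum

theorem loopB_nil (digits : List Int) (f : Nat) (res : List (List Int)) :
    loopB digits f [] res = res := by cases f <;> simp [loopB]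

-- the loop invariant: with enough fuel, B's loop emits each stack entry's subtree in order
theorem loopB_spec (digits : List Int) (hpos : ∀ d ∈ digits, 0 < d) :
    ∀ f st res, cost digits st ≤ f →
      loopB digits f st res = res ++ (st.map (node digits)).flatten := by
  intro f
  induction f using Nat.strong_induction_on with
  | _ f ih =>
    intro st res hcost
    match st with
    | [] => simp [loopB_nil]
    | (r, c) :: st' =>
      have hpow : 1 ≤ (digits.length + 1) ^ (r.toNat + 1) :=
        Nat.one_le_pow _ _ (by omega)
      have hcost' : cost digits st' + 1 ≤ f := by
        have : cost digits ((r, c) :: st') = (digits.length + 1) ^ (r.toNat + 1) + cost digits st' := by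
          simp [cost]
        omega
      match f with
      | f' + 1 =>
        simp only [loopB]
        split
        · rename_i h0
          rw [ih f' (Nat.lt_succ_self _) st' _ (by omega)]
          subst h0
          simp [node, btA]
        · split
          · rename_i hne hgt
            -- cost of the children stack
            have hchild : cost digits (digits.map (fun d => (r - d, c ++ [d]))) ≤
                digits.length * (digits.length + 1) ^ r.toNat := by
              unfold cost
              rw [List.map_map]
              calc ((digits.map ((fun p : Int × List Int => (digits.length + 1) ^ (p.1.toNat + 1)) ∘ (fun d => (r - d, c ++ [d])))).sum)
                  ≤ (digits.map (fun _ => (digits.length + 1) ^ r.toNat)).sum := by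
                    apply List.sum_le_sum
                    intro d hd
                    have hd1 : 0 < d := hpos d hd
                    have : (r - d).toNat + 1 ≤ r.toNat := by omega
                    exact Nat.pow_le_pow_right (by omega) this
                _ = digits.length * (digits.length + 1) ^ r.toNat := by
                    rw [List.map_const']
                    simp [List.sum_replicate, smul_eq_mul]
            have hsplit : (digits.length + 1) ^ (r.toNat + 1)
                = (digits.length + 1) ^ r.toNat + digits.length * (digits.length + 1) ^ r.toNat := by
              rw [pow_succ]; ring
            have hpow0 : 1 ≤ (digits.length + 1) ^ r.toNat :=
              Nat.one_le_pow _ _ (by omega)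
            have hcc : cost digits (digits.map (fun d => (r - d, c ++ [d])) ++ st') ≤ f' := by
              have happ : cost digits (digits.map (fun d => (r - d, c ++ [d])) ++ st')
                  = cost digits (digits.map (fun d => (r - d, c ++ [d]))) + cost digits st' := by
                simp [cost]
              have h1 : cost digits ((r, c) :: st')
                  = (digits.length + 1) ^ (r.toNat + 1) + cost digits st' := by simp [cost]
              omega
            rw [ih f' (Nat.lt_succ_self _) _ res hcc]
            simp only [List.map_cons, List.map_append, List.flatten_append, List.flatten_cons]
            rw [node_pos digits hpos r c hgt]
            simp [List.map_map, Function.comp_def]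
          · rename_i hne hle
            rw [ih f' (Nat.lt_succ_self _) st' res (by omega)]
            have : node digits (r, c) = [] := by
              simp only [node, btA]
              split
              · exact absurd ‹r = 0› hne
              · split
                · rfl
                · omega
            simp [this]

-- ===== VERDICT (by name: the statement is the Claim_ definition above) =====
theorem combpermuSum_spec : Claim_equal_combpermuSum := by
  intro digits target _hdom hpre
  unfold Spec_combpermuSum combpermuSum combpermuSum_alt
  by_cases hpos : 0 < target
  · have hp := hpre hpos
    rw [loopB_spec digits hp _ _ _ (by simp [cost])]
    simp [node]
  · -- target ≤ 0: single step on each side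
    rcases eq_or_lt_of_le (not_lt.mp hpos) with h0 | hneg
    · subst h0
      have hb : loopB digits ((digits.length + 1) ^ ((0 : Int).toNat + 1)) [((0 : Int), [])] []
          = [[]] := by
        have h : (digits.length + 1) ^ ((0 : Int).toNat + 1) = digits.length + 1 := by simp
        rw [h]
        simp only [loopB, if_true]
        simpa using loopB_nil digits digits.length [[]]
      rw [hb]
      simp [btA]
    · have ht : target.toNat = 0 := by omega
      rw [ht]
      have ha : btA digits (0 + 1) target [] = [] := by
        simp only [btA]
        rw [if_neg (by omega), if_pos hneg]
      have hb : loopB digits ((digits.length + 1) ^ (0 + 1)) [(target, [])] [] = [] := by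
        have h : (digits.length + 1) ^ (0 + 1) = digits.length + 1 := by simp
        rw [h]
        simp only [loopB]
        rw [if_neg (by omega), if_neg (by omega)]
        exact loopB_nil digits digits.length []
      rw [ha, hb]
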